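-- pv_equiv track=rewrite | github.com/animeshokhade/dsa | scaler/Sum the Difference.py | solve
-- ===== SOURCE A (Python) =====
-- def solve(A):
--     A.sort()
--     mod = 1000000007
--     n = len(A)
--     max_sum = 0
--     min_sum = 0
--
--     for index in range(n):
--         # contribution of each element to maximum sum will be for all the subsets in which it is maximum
--         max_sum += A[index] * ((1 << index) % mod)
--
--         # contribution of each element to minimum sum will be for all the subsets in which it is minimum
--         min_sum += A[index] * ((1 << n - 1 - index) % mod)
--
--     return (max_sum - min_sum) % mod
-- ===== SOURCE B (Python) =====
-- def solve(A):
--     # DP over the sorted prefix: when a new maximum x arrives, the subsets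
--     # containing x contribute x*(2^k - 1) - (sum of mins of nonempty subsets
--     # of the prefix); maintain that min-sum and 2^k incrementally mod p.
--     A.sort()
--     mod = 1000000007
--     ans = 0      # sum of (max - min) over nonempty subsets of the prefix, mod p
--     minsum = 0   # sum of min over nonempty subsets of the prefix, mod p
--     pw = 1       # 2^len(prefix) mod p
--     for x in A:
--         ans = (ans + x * (pw - 1) - minsum) % mod
--         minsum = (2 * minsum + x) % mod
--         pw = pw * 2 % mod
--     return ans
-- ===== Notes on version B (the rewrite author's own statement) =====
-- stated objective: faster
-- what changed: replaces the per-index power-of-two weighting (big-int shifts 1<<i for two mirror sums) by a subset DP over the sorted prefix that maintains the running min-sum of all nonempty subsets and one incrementally-updated modular power of 2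
import Mathlib
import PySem

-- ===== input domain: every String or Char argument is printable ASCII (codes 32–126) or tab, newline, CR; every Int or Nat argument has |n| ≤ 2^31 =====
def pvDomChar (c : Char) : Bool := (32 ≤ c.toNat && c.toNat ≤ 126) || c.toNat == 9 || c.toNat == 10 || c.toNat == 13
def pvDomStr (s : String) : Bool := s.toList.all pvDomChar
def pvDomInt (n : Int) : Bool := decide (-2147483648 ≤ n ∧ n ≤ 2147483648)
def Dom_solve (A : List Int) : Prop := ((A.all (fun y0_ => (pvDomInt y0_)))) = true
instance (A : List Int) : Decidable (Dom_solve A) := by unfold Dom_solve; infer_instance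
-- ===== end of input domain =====

-- B replaces A's per-index big-integer shifts (1 << i) by a subset DP over the sorted prefix,
-- maintaining the modular min-sum over nonempty subsets and one incremental power of 2 (objective: faster).
-- Both A and B sort the argument list in place; the equivalence proved here is about the return value.

-- ===== PORT A =====
-- 'index' drawn from range(n) is nonnegative, so Python's '1 << index' is exactly '1 <<< index.toNat'
-- (and likewise for the nonnegative exponent 'n - 1 - index').
def solve (A : List Int) : Int :=
  let s := PySem.List.sorted A (fun x => x) false
  let md : Int := 1000000007
  let n := s.length
  let sums :=
    (PySem.List.pyRange 0 (n : Int) 1).foldl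
      (fun (acc : Int × Int) index =>
        (acc.1 + PySem.List.pyGetD s index 0 * PySem.Int.mod ((1 : Int) <<< index.toNat) md,
         acc.2 + PySem.List.pyGetD s index 0 * PySem.Int.mod ((1 : Int) <<< ((n : Int) - 1 - index).toNat) md))
      (0, 0)
  PySem.Int.mod (sums.1 - sums.2) md

-- ===== PORT B =====
def solve_alt (A : List Int) : Int :=
  let s := PySem.List.sorted A (fun x => x) false
  let md : Int := 1000000007
  let st :=
    s.foldl
      (fun (st : Int × Int × Int) x =>
        (PySem.Int.mod (st.1 + x * (st.2.2 - 1) - st.2.1) md,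
         PySem.Int.mod (2 * st.2.1 + x) md,
         PySem.Int.mod (st.2.2 * 2) md))
      (0, 0, 1)
  st.1

-- ===== PRECONDITION & SPEC =====
def Spec_solve (A : List Int) (out : Int) : Prop := out = solve_alt A
instance (A : List Int) (out : Int) : Decidable (Spec_solve A out) := by unfold Spec_solve; infer_instance

-- ===== CLAIM (what is proved, stated in full; the proofs are below) =====
def Claim_equal_solve : Prop := ∀ (A : List Int), Dom_solve A → Spec_solve A (solve A)

-- ===== LEMMAS AND PROOFS =====

-- A loop adding to two independent accumulators over range(n) is a pair of Finset sums.
theorem pv_foldl_pair_sum (f g : ℕ → ℤ) (n : ℕ) :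
    (List.range n).foldl (fun (acc : ℤ × ℤ) k => (acc.1 + f k, acc.2 + g k)) (0, 0)
      = (∑ i ∈ Finset.range n, f i, ∑ i ∈ Finset.range n, g i) := by
  induction n with
  | zero => simp
  | succ n ih =>
    rw [List.range_succ, List.foldl_append, ih, Finset.sum_range_succ, Finset.sum_range_succ]
    simp

-- B's loop step, without the modular reductions.
def pvStepE (st : ℤ × ℤ × ℤ) (x : ℤ) : ℤ × ℤ × ℤ :=
  (st.1 + x * (st.2.2 - 1) - st.2.1, 2 * st.2.1 + x, st.2.2 * 2)

-- exact answer and min-sum of a (sorted) prefix, as index sums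
def pvAnsE (l : List ℤ) : ℤ :=
  ∑ i ∈ Finset.range l.length, l.getD i 0 * ((2 : ℤ) ^ i - 2 ^ (l.length - 1 - i))
def pvMinE (l : List ℤ) : ℤ :=
  ∑ i ∈ Finset.range l.length, l.getD i 0 * (2 : ℤ) ^ (l.length - 1 - i)

-- one modular step equals the exact step followed by componentwise reduction
theorem pv_step_mod (a m w x : ℤ) :
    ((a % 1000000007 + x * (w % 1000000007 - 1) - m % 1000000007) % 1000000007,
     (2 * (m % 1000000007) + x) % 1000000007,
     (w % 1000000007 * 2) % 1000000007)
      = ((pvStepE (a, m, w) x).1 % 1000000007,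
         (pvStepE (a, m, w) x).2.1 % 1000000007,
         (pvStepE (a, m, w) x).2.2 % 1000000007) := by
  have ha : a % 1000000007 ≡ a [ZMOD 1000000007] := Int.emod_emod_of_dvd a dvd_rfl
  have hm : m % 1000000007 ≡ m [ZMOD 1000000007] := Int.emod_emod_of_dvd m dvd_rfl
  have hw : w % 1000000007 ≡ w [ZMOD 1000000007] := Int.emod_emod_of_dvd w dvd_rfl
  refine Prod.ext ?_ (Prod.ext ?_ ?_)
  · exact (ha.add ((hw.sub_right 1).mul_left x)).sub hm
  · exact (hm.mul_left 2).add_right x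
  · exact hw.mul_right 2

-- the reduced fold computes the reduction of the exact fold
theorem pv_fold_mod (l : List ℤ) (a m w : ℤ) :
    l.foldl
      (fun (st : ℤ × ℤ × ℤ) x =>
        ((st.1 + x * (st.2.2 - 1) - st.2.1) % 1000000007,
         (2 * st.2.1 + x) % 1000000007,
         (st.2.2 * 2) % 1000000007))
      (a % 1000000007, m % 1000000007, w % 1000000007)
      = ((l.foldl pvStepE (a, m, w)).1 % 1000000007,
         (l.foldl pvStepE (a, m, w)).2.1 % 1000000007,
         (l.foldl pvStepE (a, m, w)).2.2 % 1000000007) := by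
  induction l generalizing a m w with
  | nil => rfl
  | cons x l ih =>
    simp only [List.foldl_cons]
    rw [pv_step_mod a m w x, ih]

-- the exact fold over a list computes (answer, min-sum, 2^length)
theorem pv_fold_exact (l : List ℤ) :
    l.foldl pvStepE (0, 0, 1) = (pvAnsE l, pvMinE l, 2 ^ l.length) := by
  induction l using List.reverseRecOn with
  | nil => simp [pvAnsE, pvMinE]
  | append_singleton p x ih =>
    rw [List.foldl_append, ih]
    have hk : (p ++ [x]).length = p.length + 1 := by simp
    have hgetp : ∀ i ∈ Finset.range p.length, (p ++ [x]).getD i 0 = p.getD i 0 := by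
      intro i hi
      have hi' : i < p.length := Finset.mem_range.mp hi
      rw [List.getD_eq_getElem _ _ (by simp; omega), List.getD_eq_getElem _ _ hi',
          List.getElem_append_left hi']
    have hgetx : (p ++ [x]).getD p.length 0 = x := by
      rw [List.getD_eq_getElem _ _ (by simp)]
      simp
    have hmin : pvMinE (p ++ [x]) = 2 * pvMinE p + x := by
      unfold pvMinE
      rw [hk, Finset.sum_range_succ, hgetx, Finset.mul_sum]
      have hsum : ∀ i ∈ Finset.range p.length,
          (p ++ [x]).getD i 0 * (2:ℤ) ^ (p.length + 1 - 1 - i)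
            = 2 * (p.getD i 0 * (2:ℤ) ^ (p.length - 1 - i)) := by
        intro i hi
        have hi' : i < p.length := Finset.mem_range.mp hi
        rw [hgetp i hi]
        have h : p.length + 1 - 1 - i = (p.length - 1 - i) + 1 := by omega
        rw [h, pow_succ]; ring
      rw [Finset.sum_congr rfl hsum]
      have hx : p.length + 1 - 1 - p.length = 0 := by omega
      rw [hx, pow_zero, mul_one]
    have hans : pvAnsE (p ++ [x]) = pvAnsE p + x * (2 ^ p.length - 1) - pvMinE p := by
      unfold pvAnsE pvMinE
      rw [hk, Finset.sum_range_succ, hgetx]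
      have hterm : ∀ i ∈ Finset.range p.length,
          (p ++ [x]).getD i 0 * ((2:ℤ) ^ i - 2 ^ (p.length + 1 - 1 - i))
            = p.getD i 0 * ((2:ℤ) ^ i - 2 ^ (p.length - 1 - i)) - p.getD i 0 * 2 ^ (p.length - 1 - i) := by
        intro i hi
        have hi' : i < p.length := Finset.mem_range.mp hi
        rw [hgetp i hi]
        have : p.length + 1 - 1 - i = (p.length - 1 - i) + 1 := by omega
        rw [this, pow_succ]
        ring
      rw [Finset.sum_congr rfl hterm, Finset.sum_sub_distrib]
      simp only [Nat.add_sub_cancel, Nat.sub_self, pow_zero]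
      ring
    rw [hmin, hans]
    simp only [List.foldl_cons, List.foldl_nil, pvStepE, hk, pow_succ]

-- ===== VERDICT (by name: the statement is the Claim_ definition above) =====
theorem solve_spec : Claim_equal_solve := by
  intro A _
  unfold Spec_solve solve solve_alt
  simp only []
  set s := PySem.List.sorted A (fun x => x) false with hs
  set n := s.length with hn
  have hmod : ∀ x : ℤ, PySem.Int.mod x 1000000007 = x % 1000000007 :=
    fun x => PySem.Int.mod_eq_emod_of_pos (by norm_num)
  -- normalize the A-side loop into two Finset sums
  rw [PySem.List.pyRange_zero_natCast, List.foldl_map]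
  simp only [hmod, PySem.List.pyGetD_natCast, Int.toNat_natCast, Int.shiftLeft_eq, one_mul]
  rw [pv_foldl_pair_sum (fun k => s.getD k 0 * (2 ^ k % 1000000007))
        (fun k => s.getD k 0 * (2 ^ ((n : ℤ) - 1 - (k : ℤ)).toNat % 1000000007)) n]
  -- normalize the B-side loop via the exact fold
  have h0 : ((0 : ℤ), (0 : ℤ), (1 : ℤ))
      = ((0 : ℤ) % 1000000007, (0 : ℤ) % 1000000007, (1 : ℤ) % 1000000007) := by norm_num
  rw [h0, pv_fold_mod, pv_fold_exact]
  -- both sides are residues of the same exact integer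
  have hA1 : (∑ k ∈ Finset.range n, s.getD k 0 * ((2:ℤ) ^ k % 1000000007)) % 1000000007
      = (∑ k ∈ Finset.range n, s.getD k 0 * (2:ℤ) ^ k) % 1000000007 := by
    rw [Finset.sum_int_mod, Finset.sum_congr rfl (fun k _ => by
      rw [Int.mul_emod, Int.emod_emod_of_dvd _ dvd_rfl, ← Int.mul_emod]), ← Finset.sum_int_mod]
  have hA2 : (∑ k ∈ Finset.range n, s.getD k 0 * ((2:ℤ) ^ ((n : ℤ) - 1 - (k : ℤ)).toNat % 1000000007)) % 1000000007
      = (∑ k ∈ Finset.range n, s.getD k 0 * (2:ℤ) ^ (n - 1 - k)) % 1000000007 := by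
    rw [Finset.sum_int_mod, Finset.sum_congr rfl (fun k hk => by
      have hk' : k < n := Finset.mem_range.mp hk
      have he : ((n : ℤ) - 1 - (k : ℤ)).toNat = n - 1 - k := by omega
      rw [he, Int.mul_emod, Int.emod_emod_of_dvd _ dvd_rfl, ← Int.mul_emod]), ← Finset.sum_int_mod]
  have hsub : (∑ k ∈ Finset.range n, s.getD k 0 * ((2:ℤ) ^ k % 1000000007))
        - (∑ k ∈ Finset.range n, s.getD k 0 * ((2:ℤ) ^ ((n : ℤ) - 1 - (k : ℤ)).toNat % 1000000007))
      ≡ pvAnsE s [ZMOD 1000000007] := by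
    have h1 : (∑ k ∈ Finset.range n, s.getD k 0 * ((2:ℤ) ^ k % 1000000007))
        ≡ ∑ k ∈ Finset.range n, s.getD k 0 * (2:ℤ) ^ k [ZMOD 1000000007] := hA1
    have h2 : (∑ k ∈ Finset.range n, s.getD k 0 * ((2:ℤ) ^ ((n : ℤ) - 1 - (k : ℤ)).toNat % 1000000007))
        ≡ ∑ k ∈ Finset.range n, s.getD k 0 * (2:ℤ) ^ (n - 1 - k) [ZMOD 1000000007] := hA2
    have h3 := h1.sub h2
    have : pvAnsE s = (∑ k ∈ Finset.range n, s.getD k 0 * (2:ℤ) ^ k)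
        - ∑ k ∈ Finset.range n, s.getD k 0 * (2:ℤ) ^ (n - 1 - k) := by
      unfold pvAnsE
      rw [← Finset.sum_sub_distrib]
      exact Finset.sum_congr rfl (fun k _ => by ring)
    rw [this]
    exact h3
  simpa using hsub
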